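-- pv_equiv track=rewrite | github.com/Pritz69/GFG_POTD | Difficulty: Hard/Maximum of minimum for every window size/maximum-of-minimum-for-every-window-size.py | maxOfMins
-- ===== SOURCE A (Python) =====
-- def prevS(arr,n):
--     stack = []
--     res = [None] * n
--
--     for i in range(n):
--         while len(stack) > 0 and arr[stack[-1]] >= arr[i]:
--             stack.pop()
--
--         if len(stack) == 0:
--             res[i] = -1
--         else:
--             res[i] = stack[-1]
--         stack.append(i)
--     return res
--
-- def nextS(arr,n):
--     stack = []
--     res = [None] * n
--     for i in range(n-1,-1,-1):
--         while len(stack) > 0 and arr[stack[-1]] >= arr[i]: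
--             stack.pop()
--         if len(stack) == 0:
--             res[i] = n
--         else:
--             res[i] = stack[-1]
--         stack.append(i)
--     return res
--
-- def maxOfMins(arr):
--     # code here
--     n = len(arr)
--     ns = nextS(arr,n)
--     ps = prevS(arr,n)
--
--
--     ans = [0] * (n + 1)
--
--     for i in range(n):
--         index = ns[i] - ps[i] - 1
--         ans[index] = max(arr[i],ans[index])
--     for i in range(n - 1,-1,-1):
--         ans[i] = max(ans[i],ans[i+1])
--
--     return ans[1:]
-- ===== SOURCE B (Python) =====
-- def maxOfMins(arr):
--     n = len(arr)
--     ans = [0] * (n + 1)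
--     for i in range(n):
--         m = arr[i]
--         for j in range(i, n):
--             if arr[j] < m:
--                 m = arr[j]
--             length = j - i + 1
--             if m > ans[length]:
--                 ans[length] = m
--     return ans[1:]
-- ===== Notes on version B (the rewrite author's own statement) =====
-- stated objective: simpler
-- what changed: Replaces the two monotonic-stack nearest-smaller passes plus bucket/suffix-max aggregation with a direct expanding-window brute force that maintains the running minimum per start index and maxes it into the answer for each window length.
import Mathlib
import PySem

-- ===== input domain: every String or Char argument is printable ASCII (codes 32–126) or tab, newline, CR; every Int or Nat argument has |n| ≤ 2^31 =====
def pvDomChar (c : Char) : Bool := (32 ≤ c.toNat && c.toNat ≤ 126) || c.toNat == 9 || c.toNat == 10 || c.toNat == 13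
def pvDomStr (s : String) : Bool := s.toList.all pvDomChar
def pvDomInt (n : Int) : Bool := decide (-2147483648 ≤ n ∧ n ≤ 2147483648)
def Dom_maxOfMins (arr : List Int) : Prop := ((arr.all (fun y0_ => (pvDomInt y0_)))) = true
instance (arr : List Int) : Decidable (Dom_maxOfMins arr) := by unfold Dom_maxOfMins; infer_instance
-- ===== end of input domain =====

-- B replaces A's two monotonic-stack nearest-smaller passes and bucket/suffix-max aggregation by a
-- direct expanding-window scan (running minimum per start index); simpler, same return value.

-- ===== PORT A =====
-- the 'while stack and arr[stack[-1]] >= arr[i]: stack.pop()' loop (stack head = Python stack top)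
def pvPop (arr : List Int) (v : Int) : List Int → List Int
  | [] => []
  | t :: rest => if PySem.List.pyGetD arr t 0 ≥ v then pvPop arr v rest else t :: rest

-- prevS: res[i] is assigned for i = 0..n-1 in order, so the preallocated [None]*n is built by appending
def prevS (arr : List Int) (n : Int) : List Int :=
  ((PySem.List.pyRange 0 n 1).foldl (fun st i =>
      let stack := pvPop arr (PySem.List.pyGetD arr i 0) st.1
      ((i :: stack), st.2 ++ [if stack.isEmpty then -1 else stack.headD 0]))
    (([] : List Int), ([] : List Int))).2

-- nextS: res[i] is assigned for i = n-1..0, so the result list is built by prepending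
def nextS (arr : List Int) (n : Int) : List Int :=
  ((PySem.List.pyRange (n-1) (-1) (-1)).foldl (fun st i =>
      let stack := pvPop arr (PySem.List.pyGetD arr i 0) st.1
      ((i :: stack), (if stack.isEmpty then n else stack.headD 0) :: st.2))
    (([] : List Int), ([] : List Int))).2

def maxOfMins (arr : List Int) : List Int :=
  let n : Int := PySem.List.len arr
  let ns := nextS arr n
  let ps := prevS arr n
  let ans0 : List Int := List.replicate ((n + 1).toNat) 0   -- [0] * (n + 1)
  let ans1 := (PySem.List.pyRange 0 n 1).foldl (fun ans i =>
      let index := PySem.List.pyGetD ns i 0 - PySem.List.pyGetD ps i 0 - 1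
      PySem.List.pySetD ans index (max (PySem.List.pyGetD arr i 0) (PySem.List.pyGetD ans index 0))) ans0
  let ans2 := (PySem.List.pyRange (n-1) (-1) (-1)).foldl (fun ans i =>
      PySem.List.pySetD ans i (max (PySem.List.pyGetD ans i 0) (PySem.List.pyGetD ans (i+1) 0))) ans1
  PySem.List.slice ans2 (some 1) none   -- ans[1:]

-- ===== PORT B =====
-- Source B: expanding windows; inner state is (ans, m) with m the running minimum of arr[i..j];
-- all list indices Source B uses are nonnegative and in range, so Nat indexing (range/range'/getD/set) is exact
def maxOfMins_alt (arr : List Int) : List Int :=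
  let n := arr.length
  let ans := (List.range n).foldl (fun ans i =>
      ((List.range' i (n - i)).foldl (fun st j =>
          let m := if arr.getD j 0 < st.2 then arr.getD j 0 else st.2
          let length := j - i + 1
          (if m > st.1.getD length 0 then st.1.set length m else st.1, m))
        (ans, arr.getD i 0)).1)
    (List.replicate (n + 1) 0)
  ans.drop 1   -- ans[1:]

-- ===== PRECONDITION & SPEC =====
def Spec_maxOfMins (arr : List Int) (out : List Int) : Prop := out = maxOfMins_alt arr
instance (arr : List Int) (out : List Int) : Decidable (Spec_maxOfMins arr out) := by unfold Spec_maxOfMins; infer_instance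

-- ===== CLAIM (what is proved, stated in full; the proofs are below) =====
def Claim_equal_maxOfMins : Prop := ∀ (arr : List Int), Dom_maxOfMins arr → Spec_maxOfMins arr (maxOfMins arr)

-- ===== LEMMAS AND PROOFS =====

-- arr[i] for a Nat index (all accesses in both programs are in range)
def pvA (arr : List Int) (i : Nat) : Int := arr.getD i 0

-- greatest j < i with a j < x (index of the previous strictly smaller element)
def pvPfind (a : Nat → Int) (x : Int) : Nat → Option Nat
  | 0 => none
  | j+1 => if a j < x then some j else pvPfind a x j

-- least j with lo ≤ j < n and a j < x (index of the next strictly smaller element)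
def pvNfind (a : Nat → Int) (x : Int) (n : Nat) (j : Nat) : Option Nat :=
  if h : j < n then (if a j < x then some j else pvNfind a x n (j+1)) else none
termination_by n - j

def pvPsVal (a : Nat → Int) (i : Nat) : Int :=
  match pvPfind a (a i) i with | some j => (j : Int) | none => -1
def pvNsVal (a : Nat → Int) (n i : Nat) : Int :=
  match pvNfind a (a i) n (i+1) with | some j => (j : Int) | none => (n : Int)
def pvLo (a : Nat → Int) (i : Nat) : Nat :=
  match pvPfind a (a i) i with | some j => j + 1 | none => 0
def pvHi (a : Nat → Int) (n i : Nat) : Nat :=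
  match pvNfind a (a i) n (i+1) with | some j => j | none => n
def pvLen (a : Nat → Int) (n i : Nat) : Nat := pvHi a n i - pvLo a i

-- stack contents of prevS before processing index i
def pvGoodP (a : Nat → Int) (i j : Nat) : Bool := decide (∀ k, k < i → j < k → a j < a k)
def pvSP (a : Nat → Int) (i : Nat) : List Int :=
  (((List.range i).filter (fun j => pvGoodP a i j)).reverse).map (fun (j : Nat) => (j : Int))

-- stack contents of nextS before processing index i (having processed n-1 .. i+1... i.e. suffix [i, n) processed means stack for position i-1; we use: stack after processing indices ≥ i)
def pvGoodN (a : Nat → Int) (i j : Nat) : Bool := decide (∀ k, k < j → i ≤ k → a j < a k)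
def pvSN (a : Nat → Int) (n i : Nat) : List Int :=
  ((List.range' i (n - i)).filter (fun j => pvGoodN a i j)).map (fun (j : Nat) => (j : Int))

-- min of a over [s, e] (= a s when e ≤ s)
def pvMinR (a : Nat → Int) (s e : Nat) : Int :=
  if h : s < e then min (pvMinR a s (e-1)) (a e) else a s
termination_by e

-- max of g over [k, t] (= g t when t ≤ k)
def pvMaxR (g : Nat → Int) (t k : Nat) : Int :=
  if h : k < t then max (g k) (pvMaxR g t (k+1)) else g t
termination_by t - k

-- bucket value: max(0, max of a i over i < n with pvLen = d)
def pvG (arr : List Int) (d : Nat) : Int :=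
  ((List.range arr.length).filter (fun i => pvLen (pvA arr) arr.length i = d)).foldl
    (fun acc i => max (pvA arr i) acc) 0

-- B's per-size value: max(0, max of window minima over windows of size d)
def pvBval (arr : List Int) (d : Nat) : Int :=
  ((List.range arr.length).filter (fun i => i + d ≤ arr.length)).foldl
    (fun acc i => max (pvMinR (pvA arr) i (i+d-1)) acc) 0

-- common reference value
def pvRef (arr : List Int) : List Int :=
  (List.range arr.length).map (fun k => pvMaxR (pvG arr) arr.length (k+1))


-- ---------- generic getD/set facts ----------
theorem pv_getD_set_self (l : List Int) (i : Nat) (v : Int) (h : i < l.length) :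
    (l.set i v).getD i 0 = v := by
  simp [List.getD_eq_getElem?_getD, h]

theorem pv_getD_set_ne (l : List Int) (i j : Nat) (v : Int) (h : i ≠ j) :
    (l.set i v).getD j 0 = l.getD j 0 := by
  simp [List.getD_eq_getElem?_getD, List.getElem?_set_ne h]

theorem pv_set_getD_self (l : List Int) (i : Nat) (h : i < l.length) :
    l.set i (l.getD i 0) = l := by
  rw [List.getD_eq_getElem l 0 h]; exact List.set_getElem_self ..

-- ---------- fold-of-max bounds ----------
theorem pv_foldl_max_le_iff (f : Nat → Int) (l : List Nat) (c x : Int) :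
    l.foldl (fun acc i => max (f i) acc) c ≤ x ↔ c ≤ x ∧ ∀ i ∈ l, f i ≤ x := by
  induction l generalizing c with
  | nil => simp
  | cons j t ih =>
    simp only [List.foldl_cons, ih, max_le_iff, List.mem_cons]
    constructor
    · rintro ⟨⟨h1, h2⟩, h3⟩
      exact ⟨h2, fun i hi => by rcases hi with rfl | hi; exact h1; exact h3 i hi⟩
    · rintro ⟨h1, h2⟩
      exact ⟨⟨h2 j (Or.inl rfl), h1⟩, fun i hi => h2 i (Or.inr hi)⟩

theorem pv_le_foldl_max_base (f : Nat → Int) (l : List Nat) (c : Int) :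
    c ≤ l.foldl (fun acc i => max (f i) acc) c :=
  ((pv_foldl_max_le_iff f l c _).mp le_rfl).1

theorem pv_le_foldl_max_mem (f : Nat → Int) (l : List Nat) (c : Int) {i : Nat} (hi : i ∈ l) :
    f i ≤ l.foldl (fun acc i => max (f i) acc) c :=
  ((pv_foldl_max_le_iff f l c _).mp le_rfl).2 i hi

-- ---------- fold length invariants ----------
theorem pv_foldl_length_inv {β : Type} (l : List β) (step : List Int → β → List Int)
    (h : ∀ ans x, (step ans x).length = ans.length) :
    ∀ ans : List Int, (l.foldl step ans).length = ans.length := by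
  induction l with
  | nil => intro ans; rfl
  | cons x t ih => intro ans; rw [List.foldl_cons, ih, h]

theorem pv_foldr_length_inv {β : Type} (l : List β) (step : β → List Int → List Int)
    (h : ∀ ans x, (step x ans).length = ans.length) :
    ∀ ans : List Int, (l.foldr step ans).length = ans.length := by
  induction l with
  | nil => intro ans; rfl
  | cons x t ih => intro ans; rw [List.foldr_cons, h, ih]

-- ---------- scatter-max fold characterised per bucket ----------
theorem pv_foldl_set_max (f : Nat → Int) (idx : Nat → Nat) (l : List Nat) (d : Nat) :
    ∀ ans : List Int, (∀ j ∈ l, idx j < ans.length) →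
    (l.foldl (fun ans j => ans.set (idx j) (max (f j) (ans.getD (idx j) 0))) ans).getD d 0
      = (l.filter (fun j => idx j = d)).foldl (fun acc j => max (f j) acc) (ans.getD d 0) := by
  induction l with
  | nil => intro ans _; rfl
  | cons j t ih =>
    intro ans hlen
    rw [List.foldl_cons]
    by_cases hd : idx j = d
    · have : (t.filter (fun j => idx j = d)) = (List.filter (fun j => idx j = d) t) := rfl
      rw [List.filter_cons_of_pos (by simp [hd]), List.foldl_cons,
        ih _ (by intro x hx; rw [List.length_set]; exact hlen x (List.mem_cons_of_mem _ hx)),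
        hd, pv_getD_set_self _ _ _ (hd ▸ hlen j (List.mem_cons_self ..))]
    · rw [List.filter_cons_of_neg (by simp [hd]),
        ih _ (by intro x hx; rw [List.length_set]; exact hlen x (List.mem_cons_of_mem _ hx)),
        pv_getD_set_ne _ _ _ _ hd]

-- conditional write 'if v > ans[k]: ans[k] = v' is the same list as 'ans[k] = max(v, ans[k])'
theorem pv_cond_set_eq_max_set (f : Nat → Int) (idx : Nat → Nat) (l : List Nat) (N : Nat)
    (hidx : ∀ j ∈ l, idx j < N) :
    ∀ ans : List Int, ans.length = N →
    l.foldl (fun ans j => if f j > ans.getD (idx j) 0 then ans.set (idx j) (f j) else ans) ans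
      = l.foldl (fun ans j => ans.set (idx j) (max (f j) (ans.getD (idx j) 0))) ans := by
  induction l with
  | nil => intro ans _; rfl
  | cons j t ih =>
    intro ans hlen
    rw [List.foldl_cons, List.foldl_cons]
    have hj : idx j < ans.length := hlen ▸ hidx j (List.mem_cons_self ..)
    have hstep : (if f j > ans.getD (idx j) 0 then ans.set (idx j) (f j) else ans)
        = ans.set (idx j) (max (f j) (ans.getD (idx j) 0)) := by
      by_cases h : f j > ans.getD (idx j) 0
      · rw [if_pos h, max_eq_left (le_of_lt h)]
      · rw [if_neg h, max_eq_right (not_lt.mp h), pv_set_getD_self _ _ hj]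
    rw [hstep]
    exact ih (fun x hx => hidx x (List.mem_cons_of_mem _ hx)) _ (by rw [List.length_set, hlen])


-- ---------- pvMaxR ----------
theorem pvMaxR_base (g : Nat → Int) (t k : Nat) (h : t ≤ k) : pvMaxR g t k = g t := by
  rw [pvMaxR, dif_neg (by omega)]

theorem pvMaxR_unfold (g : Nat → Int) (t k : Nat) (h : k < t) :
    pvMaxR g t k = max (g k) (pvMaxR g t (k+1)) := by
  rw [pvMaxR, dif_pos h]

theorem pvMaxR_congr (g g' : Nat → Int) (t k : Nat) (hk : k ≤ t)
    (h : ∀ j, k ≤ j → j ≤ t → g j = g' j) : pvMaxR g t k = pvMaxR g' t k := by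
  by_cases hk : k < t
  · rw [pvMaxR_unfold _ _ _ hk, pvMaxR_unfold g' _ _ hk,
      h k le_rfl (by omega), pvMaxR_congr g g' t (k+1) (by omega) (fun j h1 h2 => h j (by omega) h2)]
  · rw [pvMaxR_base g t k (by omega), pvMaxR_base g' t k (by omega), h t (by omega) le_rfl]
termination_by t - k

theorem pv_le_pvMaxR (g : Nat → Int) (t k j : Nat) (h1 : k ≤ j) (h2 : j ≤ t) :
    g j ≤ pvMaxR g t k := by
  by_cases hk : k < t
  · rw [pvMaxR_unfold _ _ _ hk]
    rcases Nat.eq_or_lt_of_le h1 with rfl | hlt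
    · exact le_max_left _ _
    · exact le_trans (pv_le_pvMaxR g t (k+1) j hlt h2) (le_max_right _ _)
  · rw [pvMaxR_base g t k (by omega)]
    have : j = t := by omega
    exact this ▸ le_rfl
termination_by t - k

theorem pv_pvMaxR_le (g : Nat → Int) (t k : Nat) (x : Int) (hk : k ≤ t)
    (h : ∀ j, k ≤ j → j ≤ t → g j ≤ x) : pvMaxR g t k ≤ x := by
  by_cases hk : k < t
  · rw [pvMaxR_unfold _ _ _ hk]
    exact max_le (h k le_rfl (by omega)) (pv_pvMaxR_le g t (k+1) x (by omega) (fun j h1 h2 => h j (by omega) h2))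
  · rw [pvMaxR_base g t k (by omega)]; exact h t (by omega) le_rfl
termination_by t - k

-- absorbing a suffix-max step: raising g at position t to max (g t) (g (t+1)) turns [k,t] into [k,t+1]
theorem pvMaxR_absorb (g g' : Nat → Int) (t k : Nat) (hk : k ≤ t)
    (hgt : g' t = max (g t) (g (t+1))) (hag : ∀ j, k ≤ j → j < t → g' j = g j) :
    pvMaxR g' t k = pvMaxR g (t+1) k := by
  rcases Nat.eq_or_lt_of_le hk with rfl | hlt
  · rw [pvMaxR_base g' k k le_rfl, hgt, pvMaxR_unfold g (k+1) k (by omega),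
      pvMaxR_base g (k+1) (k+1) le_rfl]
  · rw [pvMaxR_unfold g' t k hlt, pvMaxR_unfold g (t+1) k (by omega),
      hag k le_rfl hlt, pvMaxR_absorb g g' t (k+1) (by omega) hgt (fun j h1 h2 => hag j (by omega) h2)]
termination_by t - k

-- ---------- pvMinR ----------
theorem pvMinR_base (a : Nat → Int) (s e : Nat) (h : e ≤ s) : pvMinR a s e = a s := by
  rw [pvMinR, dif_neg (by omega)]

theorem pvMinR_succ (a : Nat → Int) (s e : Nat) (h : s ≤ e) :
    pvMinR a s e = min (pvMinR a s (e-1)) (a e) := by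
  rcases Nat.eq_or_lt_of_le h with rfl | hlt
  · rw [pvMinR_base a s s le_rfl, pvMinR_base a s (s-1) (by omega), min_self]
  · rw [pvMinR, dif_pos hlt]

theorem pv_pvMinR_le_mem (a : Nat → Int) (s e k : Nat) (h1 : s ≤ k) (h2 : k ≤ e) :
    pvMinR a s e ≤ a k := by
  by_cases hs : s < e
  · rw [pvMinR, dif_pos hs]
    rcases Nat.eq_or_lt_of_le h2 with rfl | hlt
    · exact min_le_right _ _
    · exact le_trans (min_le_left _ _) (pv_pvMinR_le_mem a s (e-1) k h1 (by omega))
  · rw [pvMinR, dif_neg hs]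
    have : k = s := by omega
    exact this ▸ le_rfl
termination_by e

theorem pv_le_pvMinR (a : Nat → Int) (s e : Nat) (x : Int) (hse : s ≤ e)
    (h : ∀ k, s ≤ k → k ≤ e → x ≤ a k) : x ≤ pvMinR a s e := by
  by_cases hs : s < e
  · rw [pvMinR, dif_pos hs]
    exact le_min (pv_le_pvMinR a s (e-1) x (by omega) (fun k h1 h2 => h k h1 (by omega)))
      (h e (by omega) le_rfl)
  · rw [pvMinR, dif_neg hs]; exact h s le_rfl (by omega)
termination_by e

theorem pvMinR_eq_of (a : Nat → Int) (s e i : Nat) (h1 : s ≤ i) (h2 : i ≤ e)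
    (h : ∀ k, s ≤ k → k ≤ e → a i ≤ a k) : pvMinR a s e = a i :=
  le_antisymm (pv_pvMinR_le_mem a s e i h1 h2) (pv_le_pvMinR a s e _ (by omega) h)

-- first position of the minimum of a window
theorem pv_argmin (a : Nat → Int) (s : Nat) : ∀ c : Nat,
    ∃ t, s ≤ t ∧ t ≤ s + c ∧ pvMinR a s (s + c) = a t ∧ ∀ k, s ≤ k → k < t → a t < a k := by
  intro c
  induction c with
  | zero => exact ⟨s, le_rfl, le_rfl, by rw [Nat.add_zero, pvMinR_base a s s le_rfl], fun k h1 h2 => by omega⟩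
  | succ c ih =>
    obtain ⟨t, ht1, ht2, ht3, ht4⟩ := ih
    rw [pvMinR_succ a s (s + (c+1)) (by omega)]
    have he : s + (c + 1) - 1 = s + c := by omega
    rw [he]
    by_cases hc : pvMinR a s (s + c) ≤ a (s + (c+1))
    · exact ⟨t, ht1, by omega, by rw [min_eq_left hc, ht3], ht4⟩
    · refine ⟨s + (c+1), le_of_lt (by omega), le_rfl, by rw [min_eq_right ((not_le.mp hc).le)], ?_⟩
      intro k h1 h2
      exact lt_of_lt_of_le (not_le.mp hc) (pv_pvMinR_le_mem a s (s+c) k h1 (by omega))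

-- ---------- pvPfind / pvNfind specs ----------
theorem pvPfind_some (a : Nat → Int) (x : Int) (i j : Nat) (h : pvPfind a x i = some j) :
    j < i ∧ a j < x ∧ ∀ k, j < k → k < i → ¬ a k < x := by
  induction i with
  | zero => simp [pvPfind] at h
  | succ i ih =>
    rw [pvPfind] at h
    by_cases hc : a i < x
    · rw [if_pos hc] at h
      cases h
      exact ⟨by omega, hc, fun k h1 h2 => by omega⟩
    · rw [if_neg hc] at h
      obtain ⟨h1, h2, h3⟩ := ih h
      refine ⟨by omega, h2, fun k hk1 hk2 => ?_⟩
      by_cases hki : k = i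
      · exact hki ▸ hc
      · exact h3 k hk1 (by omega)

theorem pvPfind_none (a : Nat → Int) (x : Int) (i : Nat) (h : pvPfind a x i = none) :
    ∀ k, k < i → ¬ a k < x := by
  induction i with
  | zero => intro k hk; omega
  | succ i ih =>
    rw [pvPfind] at h
    by_cases hc : a i < x
    · rw [if_pos hc] at h; cases h
    · rw [if_neg hc] at h
      intro k hk
      by_cases hki : k = i
      · exact hki ▸ hc
      · exact ih h k (by omega)

theorem pvNfind_some (a : Nat → Int) (x : Int) (n : Nat) : ∀ j k, pvNfind a x n j = some k →
    j ≤ k ∧ k < n ∧ a k < x ∧ ∀ m, j ≤ m → m < k → ¬ a m < x := by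
  intro j
  induction hd : n - j using Nat.strong_induction_on generalizing j with
  | _ d ih =>
  intro k h
  rw [pvNfind] at h
  by_cases hj : j < n
  · rw [dif_pos hj] at h
    by_cases hc : a j < x
    · rw [if_pos hc] at h; cases h
      exact ⟨le_rfl, hj, hc, fun m h1 h2 => by omega⟩
    · rw [if_neg hc] at h
      obtain ⟨h1, h2, h3, h4⟩ := ih (n - (j+1)) (by omega) (j+1) rfl k h
      refine ⟨by omega, h2, h3, fun m hm1 hm2 => ?_⟩
      by_cases hmj : m = j
      · exact hmj ▸ hc
      · exact h4 m (by omega) hm2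
  · rw [dif_neg hj] at h; cases h

theorem pvNfind_none (a : Nat → Int) (x : Int) (n : Nat) : ∀ j, pvNfind a x n j = none →
    ∀ m, j ≤ m → m < n → ¬ a m < x := by
  intro j
  induction hd : n - j using Nat.strong_induction_on generalizing j with
  | _ d ih =>
  intro h m hm1 hm2
  rw [pvNfind] at h
  by_cases hj : j < n
  · rw [dif_pos hj] at h
    by_cases hc : a j < x
    · rw [if_pos hc] at h; cases h
    · rw [if_neg hc] at h
      by_cases hmj : m = j
      · exact hmj ▸ hc
      · exact ih (n - (j+1)) (by omega) (j+1) rfl h m (by omega) hm2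
  · omega

-- ---------- pvLo / pvHi facts ----------
theorem pvLo_le (a : Nat → Int) (i : Nat) : pvLo a i ≤ i := by
  cases h : pvPfind a (a i) i with
  | none => simp [pvLo, h]
  | some j =>
    have := (pvPfind_some a (a i) i j h).1
    simp only [pvLo, h]; omega

theorem pvLo_prop (a : Nat → Int) (i k : Nat) (h1 : pvLo a i ≤ k) (h2 : k < i) :
    ¬ a k < a i := by
  cases h : pvPfind a (a i) i with
  | none => exact pvPfind_none a (a i) i h k h2
  | some j =>
    simp only [pvLo, h] at h1
    exact (pvPfind_some a (a i) i j h).2.2 k (by omega) h2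

theorem pvLo_min (a : Nat → Int) (i s : Nat)
    (h : ∀ k, s ≤ k → k < i → ¬ a k < a i) : pvLo a i ≤ s := by
  cases hp : pvPfind a (a i) i with
  | none => simp [pvLo, hp]
  | some j =>
    obtain ⟨h1, h2, _⟩ := pvPfind_some a (a i) i j hp
    simp only [pvLo, hp]
    by_contra hc
    exact h j (by omega) h1 h2

theorem pvHi_gt (a : Nat → Int) (n i : Nat) (h : i < n) : i < pvHi a n i := by
  cases hp : pvNfind a (a i) n (i+1) with
  | none => simp [pvHi, hp]; omega
  | some j =>
    have := (pvNfind_some a (a i) n (i+1) j hp).1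
    simp only [pvHi, hp]; omega

theorem pvHi_le (a : Nat → Int) (n i : Nat) : pvHi a n i ≤ n := by
  cases hp : pvNfind a (a i) n (i+1) with
  | none => simp [pvHi, hp]
  | some j =>
    have := (pvNfind_some a (a i) n (i+1) j hp).2.1
    simp only [pvHi, hp]; omega

theorem pvHi_prop (a : Nat → Int) (n i k : Nat) (h1 : i < k) (h2 : k < pvHi a n i) :
    ¬ a k < a i := by
  cases hp : pvNfind a (a i) n (i+1) with
  | none =>
    simp only [pvHi, hp] at h2
    exact pvNfind_none a (a i) n (i+1) hp k (by omega) h2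
  | some j =>
    simp only [pvHi, hp] at h2
    exact (pvNfind_some a (a i) n (i+1) j hp).2.2.2 k (by omega) h2

theorem pvHi_max (a : Nat → Int) (n i e : Nat) (he : e < n)
    (h : ∀ k, i < k → k ≤ e → ¬ a k < a i) : e + 1 ≤ pvHi a n i := by
  cases hp : pvNfind a (a i) n (i+1) with
  | none => simp only [pvHi, hp]; omega
  | some j =>
    obtain ⟨h1, h2, h3, _⟩ := pvNfind_some a (a i) n (i+1) j hp
    simp only [pvHi, hp]
    by_contra hc
    exact h j (by omega) (by omega) h3


-- ---------- ordered-list head/last characterisations ----------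
theorem pv_getLast_eq_max (j : Nat) : ∀ l : List Nat, l.Pairwise (· < ·) → j ∈ l →
    (∀ y ∈ l, y ≤ j) → l.getLast? = some j := by
  intro l
  induction l with
  | nil => intro _ hj _; simp at hj
  | cons x t ih =>
    intro hp hj hb
    cases t with
    | nil => simp at hj ⊢; omega
    | cons y t2 =>
      rw [List.getLast?_cons_cons]
      rcases List.mem_cons.mp hj with rfl | hjt
      · exfalso
        have hxy : j < y := (List.pairwise_cons.mp hp).1 y (List.mem_cons_self ..)
        have := hb y (List.mem_cons_of_mem _ (List.mem_cons_self ..))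
        omega
      · exact ih (List.pairwise_cons.mp hp).2 hjt (fun y hy => hb y (List.mem_cons_of_mem _ hy))

theorem pv_head_eq_min (j : Nat) : ∀ l : List Nat, l.Pairwise (· < ·) → j ∈ l →
    (∀ y ∈ l, j ≤ y) → l.head? = some j := by
  intro l
  cases l with
  | nil => intro _ hj _; simp at hj
  | cons x t =>
    intro hp hj hb
    rcases List.mem_cons.mp hj with rfl | hjt
    · rfl
    · exfalso
      have := (List.pairwise_cons.mp hp).1 j hjt
      have := hb x (List.mem_cons_self ..)
      omega

-- ---------- the pop loop on a value-sorted stack is a filter ----------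
theorem pvPop_eq_filter (arr : List Int) (v : Int) : ∀ l : List Int,
    l.Pairwise (fun x y => PySem.List.pyGetD arr y 0 < PySem.List.pyGetD arr x 0) →
    pvPop arr v l = l.filter (fun t => decide (PySem.List.pyGetD arr t 0 < v)) := by
  intro l
  induction l with
  | nil => intro _; rfl
  | cons t rest ih =>
    intro hp
    rcases List.pairwise_cons.mp hp with ⟨hhead, htail⟩
    rw [pvPop]
    by_cases hc : PySem.List.pyGetD arr t 0 ≥ v
    · rw [if_pos hc, List.filter_cons_of_neg (by simp; omega), ih htail]
    · rw [if_neg hc, List.filter_cons_of_pos (by simp; omega),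
        List.filter_eq_self.mpr (fun y hy => by simp; exact lt_trans (hhead y hy) (by omega))]

-- ---------- prevS: stack characterisation ----------
theorem pvSP_pairwise (arr : List Int) (i : Nat) :
    (pvSP (pvA arr) i).Pairwise
      (fun x y => PySem.List.pyGetD arr y 0 < PySem.List.pyGetD arr x 0) := by
  unfold pvSP
  rw [List.pairwise_map, List.pairwise_reverse]
  refine List.Pairwise.imp_of_mem ?_ (List.Pairwise.filter _ List.pairwise_lt_range)
  intro x y hx hy hxy
  simp only [PySem.List.pyGetD_natCast]
  have hgx : pvGoodP (pvA arr) i x = true := (List.mem_filter.mp hx).2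
  have hyr : y < i := List.mem_range.mp (List.mem_filter.mp hy).1
  exact of_decide_eq_true hgx y hyr hxy

theorem pvGoodP_self (arr : List Int) (i : Nat) :
    List.filter (fun j => pvGoodP (pvA arr) (i+1) j) [i] = [i] := by
  simp only [List.filter_cons, List.filter_nil]
  rw [if_pos]
  simp only [pvGoodP, decide_eq_true_eq]
  intro k hk1 hk2; omega

theorem pvPop_SP (arr : List Int) (i : Nat) :
    pvPop arr (pvA arr i) (pvSP (pvA arr) i)
      = (((List.range i).filter (fun j => pvGoodP (pvA arr) (i+1) j)).reverse).map
          (fun (j : Nat) => (j : Int)) := by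
  rw [pvPop_eq_filter arr _ _ (pvSP_pairwise arr i)]
  unfold pvSP
  rw [List.filter_map, List.filter_reverse, List.filter_filter]
  congr 2
  apply List.filter_congr
  intro j hj
  have hji : j < i := List.mem_range.mp hj
  simp only [Function.comp, PySem.List.pyGetD_natCast]
  show (decide (pvA arr j < pvA arr i) && pvGoodP (pvA arr) i j) = pvGoodP (pvA arr) (i+1) j
  rw [Bool.eq_iff_iff]
  simp only [Bool.and_eq_true, decide_eq_true_eq, pvGoodP]
  constructor
  · rintro ⟨h1, h2⟩ k hk hjk
    by_cases hki : k = i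
    · exact hki ▸ h1
    · exact h2 k (by omega) hjk
  · intro h
    exact ⟨h i (by omega) hji, fun k hk hjk => h k (by omega) hjk⟩

theorem pvSP_step (arr : List Int) (i : Nat) :
    ((i : Int) :: pvPop arr (pvA arr i) (pvSP (pvA arr) i)) = pvSP (pvA arr) (i+1) := by
  rw [pvPop_SP]
  unfold pvSP
  rw [List.range_succ, List.filter_append, pvGoodP_self, List.reverse_append]
  simp

theorem pvSP_top (arr : List Int) (i : Nat) :
    (if (pvPop arr (pvA arr i) (pvSP (pvA arr) i)).isEmpty then (-1 : Int)
      else (pvPop arr (pvA arr i) (pvSP (pvA arr) i)).headD 0) = pvPsVal (pvA arr) i := by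
  rw [pvPop_SP]
  cases hp : pvPfind (pvA arr) (pvA arr i) i with
  | none =>
    have hF : (List.range i).filter (fun j => pvGoodP (pvA arr) (i+1) j) = [] := by
      rw [List.filter_eq_nil_iff]
      intro j hj
      have hji : j < i := List.mem_range.mp hj
      simp only [pvGoodP, decide_eq_true_eq]
      intro hgood
      exact pvPfind_none _ _ _ hp j hji (hgood i (by omega) hji)
    rw [hF]
    simp [pvPsVal, hp]
  | some j =>
    obtain ⟨h1, h2, h3⟩ := pvPfind_some _ _ _ _ hp
    have hmem : j ∈ (List.range i).filter (fun j => pvGoodP (pvA arr) (i+1) j) := by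
      rw [List.mem_filter]
      refine ⟨List.mem_range.mpr h1, ?_⟩
      simp only [pvGoodP, decide_eq_true_eq]
      intro k hk hjk
      by_cases hki : k = i
      · exact hki ▸ h2
      · exact lt_of_lt_of_le h2 (not_lt.mp (h3 k hjk (by omega)))
    have hbound : ∀ y ∈ (List.range i).filter (fun j => pvGoodP (pvA arr) (i+1) j), y ≤ j := by
      intro y hy
      rw [List.mem_filter] at hy
      have hyi : y < i := List.mem_range.mp hy.1
      have hgood := of_decide_eq_true hy.2
      by_contra hc
      exact h3 y (by omega) hyi (hgood i (by omega) hyi)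
    have hlast := pv_getLast_eq_max j _ (List.Pairwise.filter _ List.pairwise_lt_range) hmem hbound
    have hh : ((((List.range i).filter (fun j => pvGoodP (pvA arr) (i+1) j)).reverse).map
        (fun (j : Nat) => (j : Int))).head? = some (j : Int) := by
      rw [List.head?_map, List.head?_reverse, hlast]; rfl
    have hne : (((List.range i).filter (fun j => pvGoodP (pvA arr) (i+1) j)).reverse).map
        (fun (j : Nat) => (j : Int)) ≠ [] := by
      intro h; rw [h] at hh; simp at hh
    rw [if_neg (by simpa [List.isEmpty_iff] using hne)]
    rw [List.headD_eq_head?_getD, hh]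
    simp [pvPsVal, hp]

theorem prevS_eq (arr : List Int) :
    prevS arr (arr.length : Int) = (List.range arr.length).map (fun t => pvPsVal (pvA arr) t) := by
  have main : ∀ i : Nat,
      (List.range i).foldl (fun (st : List Int × List Int) (j : Nat) =>
        let stack := pvPop arr (PySem.List.pyGetD arr ((j : Nat) : Int) 0) st.1
        (((j : Int) :: stack), st.2 ++ [if stack.isEmpty then -1 else stack.headD 0]))
        (([] : List Int), ([] : List Int))
      = (pvSP (pvA arr) i, (List.range i).map (fun t => pvPsVal (pvA arr) t)) := by
    intro i
    induction i with
    | zero => simp [pvSP]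
    | succ i ih =>
      rw [List.range_succ, List.foldl_append, ih, List.foldl_cons, List.foldl_nil]
      simp only [PySem.List.pyGetD_natCast]
      show ((i : Int) :: pvPop arr (arr.getD i 0) (pvSP (pvA arr) i),
          (List.range i).map (fun t => pvPsVal (pvA arr) t) ++ [_]) = _
      rw [List.map_append]
      refine Prod.ext ?_ ?_
      · show ((i : Int) :: pvPop arr (pvA arr i) (pvSP (pvA arr) i)) = _
        rw [pvSP_step]
      · show _ ++ [if (pvPop arr (pvA arr i) (pvSP (pvA arr) i)).isEmpty then (-1:Int)
            else (pvPop arr (pvA arr i) (pvSP (pvA arr) i)).headD 0] = _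
        rw [pvSP_top]
        rfl
  unfold prevS
  rw [PySem.List.pyRange_zero_nat, List.foldl_map, main]

-- ---------- nextS: stack characterisation (mirror of prevS) ----------
theorem pvSN_pairwise (arr : List Int) (n i : Nat) :
    (pvSN (pvA arr) n i).Pairwise
      (fun x y => PySem.List.pyGetD arr y 0 < PySem.List.pyGetD arr x 0) := by
  unfold pvSN
  rw [List.pairwise_map]
  refine List.Pairwise.imp_of_mem ?_ (List.Pairwise.filter _ (List.pairwise_lt_range' 1))
  intro x y hx hy hxy
  simp only [PySem.List.pyGetD_natCast]
  have hgy : pvGoodN (pvA arr) i y = true := (List.mem_filter.mp hy).2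
  have hxr : i ≤ x := (List.mem_range'_1.mp (List.mem_filter.mp hx).1).1
  exact of_decide_eq_true hgy x hxy hxr

theorem pvGoodN_self (a : Nat → Int) (i : Nat) : pvGoodN a i i = true := by
  simp only [pvGoodN, decide_eq_true_eq]
  intro k hk1 hk2; omega

theorem pvPop_SN (arr : List Int) (n i : Nat) :
    pvPop arr (pvA arr i) (pvSN (pvA arr) n (i+1))
      = ((List.range' (i+1) (n - (i+1))).filter (fun j => pvGoodN (pvA arr) i j)).map
          (fun (j : Nat) => (j : Int)) := by
  rw [pvPop_eq_filter arr _ _ (pvSN_pairwise arr n (i+1))]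
  unfold pvSN
  rw [List.filter_map, List.filter_filter]
  congr 1
  apply List.filter_congr
  intro j hj
  have hji : i + 1 ≤ j := (List.mem_range'_1.mp hj).1
  simp only [Function.comp, PySem.List.pyGetD_natCast]
  show (decide (pvA arr j < pvA arr i) && pvGoodN (pvA arr) (i+1) j) = pvGoodN (pvA arr) i j
  rw [Bool.eq_iff_iff]
  simp only [Bool.and_eq_true, decide_eq_true_eq, pvGoodN]
  constructor
  · rintro ⟨h1, h2⟩ k hk1 hk2
    by_cases hki : k = i
    · exact hki ▸ h1
    · exact h2 k hk1 (by omega)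
  · intro h
    exact ⟨h i (by omega) le_rfl, fun k hk1 hk2 => h k hk1 (by omega)⟩

theorem pvSN_step (arr : List Int) (n i : Nat) (hin : i < n) :
    ((i : Int) :: pvPop arr (pvA arr i) (pvSN (pvA arr) n (i+1))) = pvSN (pvA arr) n i := by
  rw [pvPop_SN]
  unfold pvSN
  have hni : n - i = (n - (i+1)) + 1 := by omega
  rw [hni, List.range'_succ, List.filter_cons_of_pos (pvGoodN_self _ _), List.map_cons]

theorem pvSN_top (arr : List Int) (n i : Nat) :
    (if (pvPop arr (pvA arr i) (pvSN (pvA arr) n (i+1))).isEmpty then ((n : Nat) : Int)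
      else (pvPop arr (pvA arr i) (pvSN (pvA arr) n (i+1))).headD 0)
      = pvNsVal (pvA arr) n i := by
  rw [pvPop_SN]
  cases hp : pvNfind (pvA arr) (pvA arr i) n (i+1) with
  | none =>
    have hF : (List.range' (i+1) (n - (i+1))).filter (fun j => pvGoodN (pvA arr) i j) = [] := by
      rw [List.filter_eq_nil_iff]
      intro j hj
      obtain ⟨hj1, hj2⟩ := List.mem_range'_1.mp hj
      simp only [pvGoodN, decide_eq_true_eq]
      intro hgood
      exact pvNfind_none _ _ _ _ hp j hj1 (by omega) (hgood i (by omega) (by omega))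
    rw [hF]
    simp [pvNsVal, hp]
  | some k =>
    obtain ⟨h1, h2, h3, h4⟩ := pvNfind_some _ _ _ _ _ hp
    have hmem : k ∈ (List.range' (i+1) (n - (i+1))).filter (fun j => pvGoodN (pvA arr) i j) := by
      rw [List.mem_filter]
      refine ⟨List.mem_range'_1.mpr ⟨h1, by omega⟩, ?_⟩
      simp only [pvGoodN, decide_eq_true_eq]
      intro m hm1 hm2
      by_cases hmi : m = i
      · exact hmi ▸ h3
      · exact lt_of_lt_of_le h3 (not_lt.mp (h4 m (by omega) hm1))
    have hbound : ∀ y ∈ (List.range' (i+1) (n - (i+1))).filter (fun j => pvGoodN (pvA arr) i j),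
        k ≤ y := by
      intro y hy
      rw [List.mem_filter] at hy
      obtain ⟨hy1, hy2⟩ := List.mem_range'_1.mp hy.1
      have hgood := of_decide_eq_true hy.2
      by_contra hc
      exact h4 y hy1 (by omega) (hgood i (by omega) (by omega))
    have hhead := pv_head_eq_min k _ (List.Pairwise.filter _ (List.pairwise_lt_range' 1)) hmem hbound
    have hh : ((((List.range' (i+1) (n - (i+1))).filter (fun j => pvGoodN (pvA arr) i j))).map
        (fun (j : Nat) => (j : Int))).head? = some (k : Int) := by
      rw [List.head?_map, hhead]; rfl
    have hne : (((List.range' (i+1) (n - (i+1))).filter (fun j => pvGoodN (pvA arr) i j))).map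
        (fun (j : Nat) => (j : Int)) ≠ [] := by
      intro h; rw [h] at hh; simp at hh
    rw [if_neg (by simpa [List.isEmpty_iff] using hne)]
    rw [List.headD_eq_head?_getD, hh]
    simp [pvNsVal, hp]

theorem nextS_eq (arr : List Int) :
    nextS arr (arr.length : Int) = (List.range arr.length).map (fun t => pvNsVal (pvA arr) arr.length t) := by
  have main : ∀ c i : Nat, i + c = arr.length →
      (List.range' i c).foldr (fun (j : Nat) (st : List Int × List Int) =>
        let stack := pvPop arr (PySem.List.pyGetD arr ((j : Nat) : Int) 0) st.1
        (((j : Int) :: stack),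
          (if stack.isEmpty then ((arr.length : Nat) : Int) else stack.headD 0) :: st.2))
        (([] : List Int), ([] : List Int))
      = (pvSN (pvA arr) arr.length i, (List.range' i c).map (fun t => pvNsVal (pvA arr) arr.length t)) := by
    intro c
    induction c with
    | zero =>
      intro i hi
      simp only [List.range'_zero, List.foldr_nil, List.map_nil]
      unfold pvSN
      rw [show arr.length - i = 0 by omega]
      simp
    | succ c ih =>
      intro i hi
      rw [List.range'_succ, List.foldr_cons, ih (i+1) (by omega), List.map_cons]
      simp only [PySem.List.pyGetD_natCast]
      refine Prod.ext ?_ ?_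
      · show ((i : Int) :: pvPop arr (pvA arr i) (pvSN (pvA arr) arr.length (i+1))) = _
        exact pvSN_step arr arr.length i (by omega)
      · show (if (pvPop arr (pvA arr i) (pvSN (pvA arr) arr.length (i+1))).isEmpty
            then ((arr.length : Nat) : Int)
            else (pvPop arr (pvA arr i) (pvSN (pvA arr) arr.length (i+1))).headD 0) :: _ = _
        rw [pvSN_top]
  unfold nextS
  rw [show ((arr.length : Int) - 1) = (arr.length : Int) - 1 from rfl]
  rw [PySem.List.pyRange_neg_one_eq_reverse]
  rw [show ((-1 : Int) + 1) = 0 by ring, show ((arr.length : Int) - 1 + 1) = (arr.length : Int) by ring]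
  rw [PySem.List.pyRange_zero_nat, List.foldl_reverse, List.foldr_map]
  rw [List.range_eq_range', main arr.length 0 (by omega)]

-- ---------- ps/ns values as window bounds ----------
theorem pvPsVal_eq (a : Nat → Int) (i : Nat) : pvPsVal a i = (pvLo a i : Int) - 1 := by
  cases hp : pvPfind a (a i) i <;> simp [pvPsVal, pvLo, hp]

theorem pvNsVal_eq (a : Nat → Int) (n i : Nat) : pvNsVal a n i = (pvHi a n i : Int) := by
  cases hp : pvNfind a (a i) n (i+1) <;> simp [pvNsVal, pvHi, hp]

theorem pv_index_cast (arr : List Int) (i : Nat) (hin : i < arr.length) :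
    pvNsVal (pvA arr) arr.length i - pvPsVal (pvA arr) i - 1
      = ((pvLen (pvA arr) arr.length i : Nat) : Int) := by
  rw [pvPsVal_eq, pvNsVal_eq]
  unfold pvLen
  have h1 := pvLo_le (pvA arr) i
  have h2 := pvHi_gt (pvA arr) arr.length i hin
  omega

theorem pvLen_le (arr : List Int) (i : Nat) :
    pvLen (pvA arr) arr.length i ≤ arr.length := by
  have h2 := pvHi_le (pvA arr) arr.length i
  unfold pvLen; omega

-- ---------- the descending suffix-max pass ----------
theorem pv_suffix_fold (n : Nat) : ∀ t : Nat, t ≤ n → ∀ ans : List Int, ans.length = n+1 →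
    ∀ k, k ≤ n →
    ((List.range t).foldr (fun (i : Nat) (ans : List Int) =>
        ans.set i (max (ans.getD i 0) (ans.getD (i+1) 0))) ans).getD k 0
      = if k < t then pvMaxR (fun j => ans.getD j 0) t k else ans.getD k 0 := by
  intro t
  induction t with
  | zero => intro _ ans _ k _; simp
  | succ t ih =>
    intro ht ans hlen k hk
    rw [List.range_succ, List.foldr_append, List.foldr_cons, List.foldr_nil]
    rw [ih (by omega) _ (by rw [List.length_set, hlen]) k hk]
    by_cases hkt : k < t
    · rw [if_pos hkt, if_pos (by omega)]
      apply pvMaxR_absorb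
      · omega
      · exact pv_getD_set_self ans t _ (by omega)
      · intro j _ hj; exact pv_getD_set_ne ans t j _ (by omega)
    · by_cases hkt2 : k = t
      · subst hkt2
        rw [if_neg hkt, if_pos (by omega), pv_getD_set_self ans k _ (by omega),
          pvMaxR_unfold _ _ _ (by omega), pvMaxR_base _ _ _ le_rfl]
      · rw [if_neg hkt, if_neg (by omega), pv_getD_set_ne ans t k _ (by omega)]

theorem pv_A_eq_ref (arr : List Int) : maxOfMins arr = pvRef arr := by
  have hcast1 : ∀ m : Nat, ((m : Int) + 1).toNat = m + 1 := fun m => by omega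
  unfold maxOfMins
  simp only [PySem.List.len_eq, prevS_eq, nextS_eq, PySem.List.pyRange_zero_nat,
    List.foldl_map, hcast1]
  rw [PySem.List.pyRange_neg_one_eq_reverse,
    show ((-1 : Int) + 1) = 0 by ring,
    show ((arr.length : Int) - 1 + 1) = (arr.length : Int) by ring,
    PySem.List.pyRange_zero_nat, List.foldl_reverse, List.foldr_map,
    PySem.List.slice_from_one]
  rw [PySem.List.foldl_congr_mem (List.range arr.length) _
    (fun (ans : List Int) (i : Nat) =>
      ans.set (pvLen (pvA arr) arr.length i)
        (max (pvA arr i) (ans.getD (pvLen (pvA arr) arr.length i) 0)))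
    (List.replicate (arr.length + 1) 0)
    (by
      intro acc x hx
      have hxn : x < arr.length := List.mem_range.mp hx
      simp only [PySem.List.pyGetD_natCast]
      rw [PySem.List.getD_map_range _ arr.length x _ hxn,
        PySem.List.getD_map_range _ arr.length x _ hxn,
        pv_index_cast arr x hxn]
      simp only [PySem.List.pySetD_natCast, PySem.List.pyGetD_natCast]
      rfl)]
  simp only [← Nat.cast_add_one, PySem.List.pySetD_natCast, PySem.List.pyGetD_natCast]
  have hlen1 : (List.foldl (fun (ans : List Int) (i : Nat) =>
      ans.set (pvLen (pvA arr) arr.length i)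
        (max (pvA arr i) (ans.getD (pvLen (pvA arr) arr.length i) 0)))
      (List.replicate (arr.length + 1) 0) (List.range arr.length)).length = arr.length + 1 := by
    rw [pv_foldl_length_inv _ _ (by intro ans x; simp), List.length_replicate]
  have hg : ∀ j, (List.foldl (fun (ans : List Int) (i : Nat) =>
      ans.set (pvLen (pvA arr) arr.length i)
        (max (pvA arr i) (ans.getD (pvLen (pvA arr) arr.length i) 0)))
      (List.replicate (arr.length + 1) 0) (List.range arr.length)).getD j 0 = pvG arr j := by
    intro j
    rw [pv_foldl_set_max (pvA arr) (pvLen (pvA arr) arr.length) (List.range arr.length) j _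
      (by intro x hx; rw [List.length_replicate]; have := pvLen_le arr x; omega)]
    rw [show (List.replicate (arr.length + 1) (0:Int)).getD j 0 = 0 by
      simp [List.getD_eq_getElem?_getD, List.getElem?_replicate]; split <;> rfl]
    rfl
  apply List.ext_getElem
  · rw [List.length_tail, pv_foldr_length_inv _ _ (by intro ans x; simp), hlen1]
    simp [pvRef]
  · intro k hk1 hk2
    rw [List.getElem_tail]
    have hk : k < arr.length := by
      rw [List.length_tail, pv_foldr_length_inv _ _ (by intro ans x; simp), hlen1] at hk1
      omega
    have hb : k + 1 < (List.foldr (fun (i : Nat) (ans : List Int) =>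
        ans.set i (max (ans.getD i 0) (ans.getD (i+1) 0)))
        (List.foldl (fun (ans : List Int) (i : Nat) =>
          ans.set (pvLen (pvA arr) arr.length i)
            (max (pvA arr i) (ans.getD (pvLen (pvA arr) arr.length i) 0)))
          (List.replicate (arr.length + 1) 0) (List.range arr.length))
        (List.range arr.length)).length := by
      rw [pv_foldr_length_inv _ _ (by intro ans x; simp), hlen1]; omega
    rw [← List.getD_eq_getElem _ 0 hb]
    rw [pv_suffix_fold arr.length arr.length le_rfl _ hlen1 (k+1) (by omega)]
    simp only [pvRef, List.getElem_map, List.getElem_range]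
    by_cases hkn : k + 1 < arr.length
    · rw [if_pos hkn]
      exact pvMaxR_congr _ _ _ _ (by omega) (fun j _ hj => hg j)
    · have hkeq : k + 1 = arr.length := by omega
      rw [if_neg (by omega), hkeq, hg arr.length, pvMaxR_base _ _ _ le_rfl]
-- ---------- B: the inner expanding-window loop ----------
theorem pv_inner_shape (arr : List Int) (i : Nat) : ∀ (c s : Nat), i ≤ s → ∀ ans : List Int,
    ((List.range' s c).foldl (fun (st : List Int × Int) (j : Nat) =>
        let m := if arr.getD j 0 < st.2 then arr.getD j 0 else st.2
        let length := j - i + 1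
        (if m > st.1.getD length 0 then st.1.set length m else st.1, m))
      (ans, pvMinR (pvA arr) i (s-1))).1
    = (List.range' s c).foldl (fun (ans : List Int) (j : Nat) =>
        if pvMinR (pvA arr) i j > ans.getD (j-i+1) 0 then ans.set (j-i+1) (pvMinR (pvA arr) i j)
        else ans) ans := by
  intro c
  induction c with
  | zero => intro s hs ans; rfl
  | succ c ih =>
    intro s hs ans
    rw [List.range'_succ, List.foldl_cons, List.foldl_cons]
    have hm : (if arr.getD s 0 < pvMinR (pvA arr) i (s-1) then arr.getD s 0
        else pvMinR (pvA arr) i (s-1)) = pvMinR (pvA arr) i s := by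
      rw [pvMinR_succ (pvA arr) i s hs]
      show (if pvA arr s < pvMinR (pvA arr) i (s-1) then pvA arr s
        else pvMinR (pvA arr) i (s-1)) = _
      rw [min_def]
      split_ifs <;> omega
    dsimp only
    rw [hm]
    exact ih (s+1) (by omega) _

theorem pv_inner_length (arr : List Int) (i : Nat) : ∀ (c s : Nat) (ans : List Int) (m : Int),
    (((List.range' s c).foldl (fun (st : List Int × Int) (j : Nat) =>
        let m := if arr.getD j 0 < st.2 then arr.getD j 0 else st.2
        let length := j - i + 1
        (if m > st.1.getD length 0 then st.1.set length m else st.1, m))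
      (ans, m)).1).length = ans.length := by
  intro c
  induction c with
  | zero => intro s ans m; rfl
  | succ c ih =>
    intro s ans m
    rw [List.range'_succ, List.foldl_cons, ih (s+1)]
    dsimp only
    split <;> split <;> simp

theorem pv_filter_eq_single (d : Nat) (hd : 1 ≤ d) : ∀ (c s : Nat),
    (List.range' s c).filter (fun j => j - s + 1 = d)
      = if d ≤ c then [s + d - 1] else [] := by
  induction d with
  | zero => omega
  | succ d ihd =>
    intro c s
    cases c with
    | zero => simp
    | succ c =>
      rw [List.range'_succ]
      by_cases hd1 : d = 0
      · subst hd1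
        rw [List.filter_cons_of_pos (by simp), if_pos (by omega)]
        have : (List.range' (s+1) c).filter (fun j => j - s + 1 = 1) = [] := by
          rw [List.filter_eq_nil_iff]
          intro j hj
          have := (List.mem_range'_1.mp hj).1
          simp only [decide_eq_true_eq]
          omega
        rw [this]
        norm_num
      · rw [List.filter_cons_of_neg
          (by show ¬ (decide (s - s + 1 = d + 1) = true); simp only [decide_eq_true_eq]; omega)]
        have hcong : (List.range' (s+1) c).filter (fun j => j - s + 1 = d + 1)
            = (List.range' (s+1) c).filter (fun j => j - (s+1) + 1 = d) := by
          apply List.filter_congr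
          intro j hj
          have := (List.mem_range'_1.mp hj).1
          rw [decide_eq_decide]
          omega
        rw [hcong, ihd (by omega) c (s+1)]
        by_cases hdc : d ≤ c
        · rw [if_pos hdc, if_pos (by omega)]
          congr 1
          omega
        · rw [if_neg hdc, if_neg (by omega)]

-- ---------- B: the outer loop, characterised per answer slot ----------
theorem pv_outer (arr : List Int) (d : Nat) (hd : 1 ≤ d) : ∀ (l : List Nat),
    (∀ i ∈ l, i < arr.length) → ∀ ans : List Int, ans.length = arr.length + 1 →
    (l.foldl (fun (ans : List Int) (i : Nat) =>
        ((List.range' i (arr.length - i)).foldl (fun (st : List Int × Int) (j : Nat) =>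
            let m := if arr.getD j 0 < st.2 then arr.getD j 0 else st.2
            let length := j - i + 1
            (if m > st.1.getD length 0 then st.1.set length m else st.1, m))
          (ans, arr.getD i 0)).1) ans).getD d 0
      = (l.filter (fun i => i + d ≤ arr.length)).foldl
          (fun acc i => max (pvMinR (pvA arr) i (i+d-1)) acc) (ans.getD d 0) := by
  intro l
  induction l with
  | nil => intro _ ans _; rfl
  | cons i t ih =>
    intro hmem ans hlen
    have hin : i < arr.length := hmem i (List.mem_cons_self ..)
    rw [List.foldl_cons]
    have hstep : ((List.range' i (arr.length - i)).foldl (fun (st : List Int × Int) (j : Nat) =>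
          let m := if arr.getD j 0 < st.2 then arr.getD j 0 else st.2
          let length := j - i + 1
          (if m > st.1.getD length 0 then st.1.set length m else st.1, m))
        (ans, arr.getD i 0)).1
        = (List.range' i (arr.length - i)).foldl (fun (ans : List Int) (j : Nat) =>
            ans.set (j-i+1) (max (pvMinR (pvA arr) i j) (ans.getD (j-i+1) 0))) ans := by
      rw [show arr.getD i 0 = pvMinR (pvA arr) i (i-1) from (pvMinR_base (pvA arr) i (i-1) (by omega)).symm,
        pv_inner_shape arr i _ i le_rfl,
        pv_cond_set_eq_max_set (pvMinR (pvA arr) i) (fun j => j - i + 1)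
          (List.range' i (arr.length - i)) (arr.length + 1)
          (by intro j hj
              show j - i + 1 < arr.length + 1
              have := (List.mem_range'_1.mp hj).2; omega) ans hlen]
    rw [hstep]
    have hlen2 : ((List.range' i (arr.length - i)).foldl (fun (ans : List Int) (j : Nat) =>
        ans.set (j-i+1) (max (pvMinR (pvA arr) i j) (ans.getD (j-i+1) 0))) ans).length
        = arr.length + 1 := by
      rw [pv_foldl_length_inv _ _ (by intro ans x; simp), hlen]
    rw [ih (fun x hx => hmem x (List.mem_cons_of_mem _ hx)) _ hlen2]
    rw [pv_foldl_set_max (pvMinR (pvA arr) i) (fun j => j - i + 1)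
      (List.range' i (arr.length - i)) d ans
      (by intro j hj
          show j - i + 1 < ans.length
          rw [hlen]
          have := (List.mem_range'_1.mp hj).2; omega)]
    rw [pv_filter_eq_single d hd (arr.length - i) i]
    by_cases hc : i + d ≤ arr.length
    · rw [if_pos (by omega), List.filter_cons_of_pos (by simp; omega)]
      rfl
    · rw [if_neg (by omega), List.filter_cons_of_neg (by simp; omega)]
      rfl

-- ---------- the combinatorial core: per-size maxima agree ----------
theorem pv_key (arr : List Int) (d : Nat) (hd1 : 1 ≤ d) (hdn : d ≤ arr.length) :
    pvBval arr d = pvMaxR (pvG arr) arr.length d := by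
  have hG0 : ∀ j, 0 ≤ pvG arr j := fun j => pv_le_foldl_max_base _ _ _
  have hMax0 : 0 ≤ pvMaxR (pvG arr) arr.length d :=
    le_trans (hG0 arr.length) (pv_le_pvMaxR _ _ _ arr.length hdn le_rfl)
  apply le_antisymm
  · -- every window minimum is bounded by some bucket value
    unfold pvBval
    rw [pv_foldl_max_le_iff]
    refine ⟨hMax0, ?_⟩
    intro i hi
    rw [List.mem_filter] at hi
    obtain ⟨hir, his⟩ := hi
    have hin : i < arr.length := List.mem_range.mp hir
    have hid : i + d ≤ arr.length := by simpa using his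
    obtain ⟨t, ht1, ht2, ht3, ht4⟩ := pv_argmin (pvA arr) i (d-1)
    have htd : i + (d-1) = i + d - 1 := by omega
    rw [htd] at ht2 ht3
    rw [ht3]
    have htn : t < arr.length := by omega
    -- the argmin's maximal window has size at least d
    have hlo : pvLo (pvA arr) t ≤ i :=
      pvLo_min (pvA arr) t i (fun k hk1 hk2 => not_lt.mpr (le_of_lt (ht4 k hk1 hk2)))
    have hhi : i + d ≤ pvHi (pvA arr) arr.length t := by
      have := pvHi_max (pvA arr) arr.length t (i + d - 1) (by omega)
        (fun k hk1 hk2 => not_lt.mpr (ht3 ▸ pv_pvMinR_le_mem (pvA arr) i (i+d-1) k (by omega) hk2))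
      omega
    have hlent : d ≤ pvLen (pvA arr) arr.length t ∧ pvLen (pvA arr) arr.length t ≤ arr.length := by
      have := pvHi_le (pvA arr) arr.length t
      unfold pvLen
      omega
    have h1 : pvA arr t ≤ pvG arr (pvLen (pvA arr) arr.length t) := by
      unfold pvG
      exact pv_le_foldl_max_mem _ _ _
        (List.mem_filter.mpr ⟨List.mem_range.mpr htn, by simp⟩)
    exact le_trans h1 (pv_le_pvMaxR _ _ _ _ hlent.1 hlent.2)
  · -- every bucket value is realised by a window of size d
    apply pv_pvMaxR_le _ _ _ _ hdn
    intro dd hdd1 hdd2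
    unfold pvG
    rw [pv_foldl_max_le_iff]
    refine ⟨pv_le_foldl_max_base _ _ _, ?_⟩
    intro i hi
    rw [List.mem_filter] at hi
    obtain ⟨hir, hilen⟩ := hi
    have hin : i < arr.length := List.mem_range.mp hir
    have hilen' : pvLen (pvA arr) arr.length i = dd := by simpa using hilen
    have hlo := pvLo_le (pvA arr) i
    have hhi := pvHi_gt (pvA arr) arr.length i hin
    have hhin := pvHi_le (pvA arr) arr.length i
    have hlend : d ≤ pvHi (pvA arr) arr.length i - pvLo (pvA arr) i := by
      unfold pvLen at hilen'
      omega
    -- choose a window of size d inside the maximal window, containing i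
    have hsc := min_choice i (pvHi (pvA arr) arr.length i - d)
    have hs1 := min_le_left i (pvHi (pvA arr) arr.length i - d)
    have hs2 := min_le_right i (pvHi (pvA arr) arr.length i - d)
    set s := min i (pvHi (pvA arr) arr.length i - d) with hsdef
    have hw1 : s + d ≤ arr.length := by omega
    have hw2 : s ≤ i := hs1
    have hw3 : i ≤ s + d - 1 := by omega
    have hw4 : pvLo (pvA arr) i ≤ s := by omega
    have hw5 : s + d - 1 < pvHi (pvA arr) arr.length i := by omega
    have hmin : pvMinR (pvA arr) s (s + d - 1) = pvA arr i := by
      apply pvMinR_eq_of _ _ _ _ hw2 hw3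
      intro k hk1 hk2
      rcases lt_trichotomy k i with hki | hki | hki
      · exact not_lt.mp (pvLo_prop (pvA arr) i k (by omega) hki)
      · exact hki ▸ le_rfl
      · exact not_lt.mp (pvHi_prop (pvA arr) arr.length i k hki (by omega))
    rw [← hmin]
    unfold pvBval
    exact pv_le_foldl_max_mem _ _ _
      (List.mem_filter.mpr ⟨List.mem_range.mpr (by omega), by simp; omega⟩)

theorem pv_B_eq_ref (arr : List Int) : maxOfMins_alt arr = pvRef arr := by
  unfold maxOfMins_alt
  show ((List.range arr.length).foldl (fun (ans : List Int) (i : Nat) =>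
      ((List.range' i (arr.length - i)).foldl (fun (st : List Int × Int) (j : Nat) =>
          let m := if arr.getD j 0 < st.2 then arr.getD j 0 else st.2
          let length := j - i + 1
          (if m > st.1.getD length 0 then st.1.set length m else st.1, m))
        (ans, arr.getD i 0)).1)
      (List.replicate (arr.length + 1) 0)).drop 1 = pvRef arr
  have hlenB : ((List.range arr.length).foldl (fun (ans : List Int) (i : Nat) =>
      ((List.range' i (arr.length - i)).foldl (fun (st : List Int × Int) (j : Nat) =>
          let m := if arr.getD j 0 < st.2 then arr.getD j 0 else st.2
          let length := j - i + 1
          (if m > st.1.getD length 0 then st.1.set length m else st.1, m))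
        (ans, arr.getD i 0)).1)
      (List.replicate (arr.length + 1) 0)).length = arr.length + 1 := by
    rw [pv_foldl_length_inv _ _ (fun ans x => pv_inner_length arr x _ x ans _),
      List.length_replicate]
  apply List.ext_getElem
  · rw [List.length_drop, hlenB]
    simp [pvRef]
  · intro k hk1 hk2
    rw [List.length_drop, hlenB] at hk1
    have hkn : k < arr.length := by omega
    rw [List.getElem_drop]
    rw [← List.getD_eq_getElem _ 0 (by rw [hlenB]; omega)]
    rw [show (1 + k) = k + 1 by omega]
    rw [pv_outer arr (k+1) (by omega) (List.range arr.length)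
      (fun x hx => List.mem_range.mp hx) _ (by rw [List.length_replicate])]
    rw [show (List.replicate (arr.length + 1) (0:Int)).getD (k+1) 0 = 0 by
      simp [List.getD_eq_getElem?_getD, List.getElem?_replicate]; split <;> rfl]
    have hBv : ((List.range arr.length).filter (fun i => i + (k+1) ≤ arr.length)).foldl
        (fun acc i => max (pvMinR (pvA arr) i (i+(k+1)-1)) acc) 0 = pvBval arr (k+1) := rfl
    rw [hBv, pv_key arr (k+1) (by omega) (by omega)]
    simp only [pvRef, List.getElem_map, List.getElem_range]
-- ===== VERDICT (by name: the statement is the Claim_ definition above) =====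
theorem maxOfMins_spec : Claim_equal_maxOfMins := by
  intro arr _
  unfold Spec_maxOfMins
  rw [pv_A_eq_ref, pv_B_eq_ref]
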